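-- pv_equiv track=rewrite | github.com/rodonguyen/practice_data_structures | old/test2.py | courses_completed_by_one
-- ===== SOURCE A (Python) =====
-- from dataclasses import dataclass
-- from typing import Dict
--
-- @dataclass
-- class CourseWatchCount:
--     course_id: str
--     watch_counter: int
--
-- def courses_completed_by_one(input: Dict):
--     watched: Dict[CourseWatchCount] = {}
--     for user, courses in input.items():
--         for c in courses:
--             watched[c] = watched.get(c, 0) + 1
--
--     only_one_finishes: list[str] = []
--     for course, watched_times in watched.items():
--         if watched_times == 1:
--             only_one_finishes.append(course)
--
--     return only_one_finishes
-- ===== SOURCE B (Python) =====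
-- def courses_completed_by_one(input):
--     once = {}       # insertion-ordered: courses seen exactly once so far
--     multiple = set()  # courses seen at least twice
--     for courses in input.values():
--         for c in courses:
--             if c in multiple:
--                 continue
--             if c in once:
--                 del once[c]
--                 multiple.add(c)
--             else:
--                 once[c] = None
--     return list(once)
-- ===== Notes on version B (the rewrite author's own statement) =====
-- stated objective: alternative
-- what changed: Replaces A's count-all-then-filter two passes by a single pass that maintains an insertion-ordered 'once' dict and a 'multiple' set, moving a course out of 'once' the second time it is seen.
import Mathlib
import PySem

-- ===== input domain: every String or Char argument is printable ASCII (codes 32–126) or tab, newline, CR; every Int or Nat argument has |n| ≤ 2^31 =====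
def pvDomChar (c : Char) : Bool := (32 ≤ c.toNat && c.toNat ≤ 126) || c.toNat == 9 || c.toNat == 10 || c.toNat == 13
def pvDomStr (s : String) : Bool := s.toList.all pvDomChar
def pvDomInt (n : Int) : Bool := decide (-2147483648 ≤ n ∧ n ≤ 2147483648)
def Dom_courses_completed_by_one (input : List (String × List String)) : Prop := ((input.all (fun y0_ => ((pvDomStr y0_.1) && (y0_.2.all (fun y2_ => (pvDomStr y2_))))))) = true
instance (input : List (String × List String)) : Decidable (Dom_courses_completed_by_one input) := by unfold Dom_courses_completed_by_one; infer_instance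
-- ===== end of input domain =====

-- B replaces A's count-all-then-filter two passes by a single pass over the courses that
-- maintains an insertion-ordered dict `once` (seen exactly once) and a set `multiple`.


-- ===== PORT A =====
def courses_completed_by_one (input : List (String × List String)) : List String :=
  let watched : PySem.Dict String Int :=
    input.foldl (fun w uc => uc.2.foldl (fun w c => w.insert c (w.getD c 0 + 1)) w)
      PySem.Dict.empty
  watched.items.foldl (fun acc p => if p.2 == 1 then acc ++ [p.1] else acc) []

-- ===== PORT B =====
def courses_completed_by_one_alt (input : List (String × List String)) : List String :=
  let st : PySem.Dict String Unit × PySem.Set String :=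
    input.foldl (fun st uc => uc.2.foldl
      (fun st c =>
        if PySem.Set.contains st.2 c then st
        else if st.1.contains c then (st.1.erase c, PySem.Set.add st.2 c)
        else (st.1.insert c (), st.2)) st)
      (PySem.Dict.empty, PySem.Set.empty)
  st.1.keys

-- ===== PRECONDITION & SPEC =====
def Spec_courses_completed_by_one (input : List (String × List String)) (out : List String) : Prop := out = courses_completed_by_one_alt input
instance (input : List (String × List String)) (out : List String) : Decidable (Spec_courses_completed_by_one input out) := by unfold Spec_courses_completed_by_one; infer_instance

-- ===== CLAIM (what is proved, stated in full; the proofs are below) =====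
def Claim_equal_courses_completed_by_one : Prop := ∀ (input : List (String × List String)), Dom_courses_completed_by_one input → Spec_courses_completed_by_one input (courses_completed_by_one input)

-- ===== LEMMAS AND PROOFS =====

-- A's counting dict after processing a flat list of courses
def dA (L : List String) : PySem.Dict String Int :=
  L.foldl (fun w c => w.insert c (w.getD c 0 + 1)) PySem.Dict.empty

-- B's state after processing a flat list of courses
def sB (L : List String) : PySem.Dict String Unit × PySem.Set String :=
  L.foldl
    (fun st c =>
      if PySem.Set.contains st.2 c then st
      else if st.1.contains c then (st.1.erase c, PySem.Set.add st.2 c)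
      else (st.1.insert c (), st.2))
    (PySem.Dict.empty, PySem.Set.empty)

lemma dA_nodup_keys (L : List String) : (dA L).keys.Nodup := by
  unfold dA
  exact PySem.Dict.nodup_keys_foldl_insert L (fun d x => d.getD x 0 + 1) PySem.Dict.empty
    (by simp [PySem.Dict.keys_empty])

-- in-place bump of the unique entry for c: effect on the snd==1 filter
lemma filter_map_bump (l : List (String × Int)) (c : String) (n : Int)
    (h : ∀ p ∈ l, p.1 = c → p.2 = n) (h1 : 1 ≤ n) :
    (l.map (fun p => if p.1 == c then (c, n + 1) else p)).filter (fun p => p.2 == 1) =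
      if n = 1 then (l.filter (fun p => p.2 == 1)).filter (fun p => !(p.1 == c))
      else l.filter (fun p => p.2 == 1) := by
  induction l with
  | nil => simp
  | cons p t ih =>
    have ht := ih (fun q hq => h q (List.mem_cons_of_mem _ hq))
    by_cases hpc : p.1 = c
    · have hpn : p.2 = n := h p (List.mem_cons_self) hpc
      have hn1 : ¬ (n + 1 = 1) := by omega
      by_cases hn : n = 1 <;>
        simp_all
    · by_cases hn : n = 1 <;> by_cases hp1 : p.2 = 1 <;>
        simp_all

lemma main_inv (L : List String) :
    (sB L).1.items = ((dA L).items.filter (fun p => p.2 == 1)).map (fun p => (p.1, ()))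
    ∧ (∀ x : String, x ∈ (sB L).2 ↔ 2 ≤ (dA L).getD x 0)
    ∧ (∀ p ∈ (dA L).items, 1 ≤ p.2) := by
  induction L using List.reverseRecOn with
  | nil => refine ⟨rfl, ?_, ?_⟩ <;> simp [sB, dA, PySem.Dict.getD, PySem.Dict.get?, PySem.Dict.empty]
  | append_singleton L c ih =>
    obtain ⟨hI, hII, hIII⟩ := ih
    have hnd := dA_nodup_keys L
    have hdA : dA (L ++ [c]) = (dA L).insert c ((dA L).getD c 0 + 1) := by
      simp [dA, List.foldl_append]
    have hsB : sB (L ++ [c]) =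
        (if PySem.Set.contains (sB L).2 c then sB L
         else if (sB L).1.contains c then ((sB L).1.erase c, PySem.Set.add (sB L).2 c)
         else ((sB L).1.insert c (), (sB L).2)) := by
      simp [sB, List.foldl_append]
    by_cases hc : (dA L).contains c = true
    · -- c already counted; n = its current count, n ≥ 1
      obtain ⟨n, hget⟩ : ∃ n, (dA L).get? c = some n := by
        have := PySem.Dict.contains_eq_isSome_get? (dA L) c
        rw [hc] at this
        exact Option.isSome_iff_exists.mp this.symm
      have hmem : (c, n) ∈ (dA L).items := PySem.Dict.mem_items_of_get?_eq_some _ hget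
      have hgetD : (dA L).getD c 0 = n := by
        simp [PySem.Dict.getD_eq_get?_getD, hget]
      have hn1 : 1 ≤ n := hIII _ hmem
      have huniq : ∀ p ∈ (dA L).items, p.1 = c → p.2 = n := by
        intro p hp hpc
        have : (dA L).get? c = some p.2 := by
          have := PySem.Dict.get?_of_mem_items (d := dA L) (k := p.1) (v := p.2)
            (by simpa using hp) hnd
          rwa [hpc] at this
        rw [hget] at this; exact (Option.some.injEq _ _).mp this |>.symm
      have hitems' : (dA (L ++ [c])).items =
          (dA L).items.map (fun p => if p.1 == c then (c, n + 1) else p) := by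
        rw [hdA, PySem.Dict.items_insert_of_contains _ _ hc, hgetD]
      by_cases h2 : 2 ≤ n
      · -- seen at least twice already: B skips, A's filter is unchanged
        have hmul : PySem.Set.contains (sB L).2 c = true :=
          (PySem.Set.contains_iff _ _).mpr ((hII c).mpr (hgetD ▸ h2))
        rw [hsB]; rw [hmul]; simp only [if_true]
        refine ⟨?_, ?_, ?_⟩
        · rw [hI, hitems', filter_map_bump _ c n huniq hn1, if_neg (by omega)]
        · intro x
          rw [hII x, hdA, PySem.Dict.getD_insert, hgetD]
          by_cases hx : x = c <;> (simp [hx, hgetD]; try omega)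
        · intro p hp
          rw [hitems'] at hp
          obtain ⟨q, hq, hpq⟩ := List.mem_map.mp hp
          by_cases hqc : q.1 = c
          · simp [hqc] at hpq
            rw [← hpq]
            show 1 ≤ n + 1
            omega
          · simp [hqc] at hpq
            rw [← hpq]
            exact hIII q hq
      · -- n = 1: the second sighting; B moves c from once to multiple
        have hn : n = 1 := by omega
        subst hn
        have hmul : PySem.Set.contains (sB L).2 c = false := by
          rw [Bool.eq_false_iff]
          intro hcon
          have := (hII c).mp ((PySem.Set.contains_iff _ _).mp hcon)
          omega
        have honce : (sB L).1.contains c = true := by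
          have : (c, ()) ∈ (sB L).1.items := by
            rw [hI]
            exact List.mem_map.mpr ⟨(c, 1), List.mem_filter.mpr ⟨hmem, by simp⟩, rfl⟩
          simp only [PySem.Dict.contains, List.any_eq_true]
          exact ⟨(c, ()), this, by simp⟩
        rw [hsB]; rw [hmul]; simp only [Bool.false_eq_true, if_false]
        rw [honce]; simp only [if_true]
        refine ⟨?_, ?_, ?_⟩
        · show ((sB L).1.erase c).items = _
          rw [hitems', filter_map_bump _ c 1 huniq (by omega), if_pos rfl]
          simp only [PySem.Dict.erase, hI]
          rw [List.filter_map]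
          rfl
        · intro x
          simp only [PySem.Set.mem_add]
          rw [hdA, PySem.Dict.getD_insert, hgetD]
          by_cases hx : x = c
          · simp [hx]
          · simp only [hx, if_false]
            rw [hII x]
            constructor
            · rintro (h | h)
              · exact h
              · exact h.elim
            · exact Or.inl
        · intro p hp
          rw [hitems'] at hp
          obtain ⟨q, hq, hpq⟩ := List.mem_map.mp hp
          by_cases hqc : q.1 = c
          · simp [hqc] at hpq
            rw [← hpq]
            show (1:Int) ≤ 1 + 1
            omega
          · simp [hqc] at hpq
            rw [← hpq]
            exact hIII q hq
    · -- first sighting of c: A appends (c, 1), B appends (c, ()) to once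
      have hc' : (dA L).contains c = false := by
        simpa using hc
      have hgetD : (dA L).getD c 0 = 0 := PySem.Dict.getD_of_not_contains _ _ hc'
      have hitems' : (dA (L ++ [c])).items = (dA L).items ++ [(c, 1)] := by
        rw [hdA, PySem.Dict.items_insert_of_not_contains _ _ hc', hgetD]
        norm_num
      have hmul : PySem.Set.contains (sB L).2 c = false := by
        rw [Bool.eq_false_iff]
        intro hcon
        have := (hII c).mp ((PySem.Set.contains_iff _ _).mp hcon)
        omega
      have honce : (sB L).1.contains c = false := by
        rw [Bool.eq_false_iff]
        intro hcon
        simp only [PySem.Dict.contains, List.any_eq_true] at hcon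
        obtain ⟨p, hp, hpc⟩ := hcon
        rw [hI] at hp
        obtain ⟨q, hq, hpq⟩ := List.mem_map.mp hp
        have hqmem : q ∈ (dA L).items := (List.mem_filter.mp hq).1
        have : (dA L).contains c = true := by
          simp only [PySem.Dict.contains, List.any_eq_true]
          refine ⟨q, hqmem, ?_⟩
          have : p.1 = q.1 := by rw [← hpq]
          simpa [← this] using hpc
        exact absurd this hc
      have honce' : ((sB L).1.insert c ()).items = (sB L).1.items ++ [(c, ())] :=
        PySem.Dict.items_insert_of_not_contains _ _ honce
      rw [hsB]; rw [hmul]; simp only [Bool.false_eq_true, if_false]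
      rw [honce]; simp only [Bool.false_eq_true, if_false]
      refine ⟨?_, ?_, ?_⟩
      · show ((sB L).1.insert c ()).items = _
        rw [honce', hitems', hI, List.filter_append, List.map_append]
        simp
      · intro x
        show x ∈ (sB L).2 ↔ _
        rw [hdA, PySem.Dict.getD_insert, hgetD]
        by_cases hx : x = c
        · subst hx
          rw [hII x, hgetD]
          constructor <;> intro h <;> omega
        · simp only [hx, if_false]
          exact hII x
      · intro p hp
        rw [hitems'] at hp
        rcases List.mem_append.mp hp with h | h
        · exact hIII p h
        · rw [List.mem_singleton] at h
          simp [h]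

-- flatten both nested folds to folds over the flat course list
lemma flat_fold {σ : Type} (f : σ → String → σ) (init : σ)
    (input : List (String × List String)) :
    input.foldl (fun s uc => uc.2.foldl f s) init =
      (input.map (·.2)).flatten.foldl f init := by
  rw [List.foldl_flatten, List.foldl_map]

-- ===== VERDICT (by name: the statement is the Claim_ definition above) =====
theorem courses_completed_by_one_spec : Claim_equal_courses_completed_by_one := by
  intro input _
  show _ = _
  unfold courses_completed_by_one courses_completed_by_one_alt
  simp only [flat_fold]
  rw [show ((input.map (·.2)).flatten.foldl (fun w c => w.insert c (w.getD c 0 + 1))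
        PySem.Dict.empty) = dA ((input.map (·.2)).flatten) from rfl,
      show ((input.map (·.2)).flatten.foldl
        (fun st c =>
          if PySem.Set.contains st.2 c then st
          else if st.1.contains c then (st.1.erase c, PySem.Set.add st.2 c)
          else (st.1.insert c (), st.2)) (PySem.Dict.empty, PySem.Set.empty)) =
        sB ((input.map (·.2)).flatten) from rfl]
  set L := (input.map (·.2)).flatten
  rw [PySem.List.foldl_append_if (fun p : String × Int => p.2 == 1) (fun p => p.1) (dA L).items []]
  simp only [List.nil_append]
  show _ = (sB L).1.keys
  rw [PySem.Dict.keys, (main_inv L).1, List.map_map]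
  rfl
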